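-- pv_equiv track=rewrite | github.com/Geon-05/dailycoding | programmers_기초/day13/day13_3.py | solution
-- ===== SOURCE A (Python) =====
-- def solution(str_list):
--     answer = []
--     for idx, i in enumerate(str_list):
--         if i == 'l':
--             answer = str_list[:idx]
--             break
--         if i == 'r':
--             answer = str_list[idx+1:]
--             break
--     return answer
-- ===== SOURCE B (Python) =====
-- def solution(str_list):
--     li = str_list.index('l') if 'l' in str_list else None
--     ri = str_list.index('r') if 'r' in str_list else None
--     if li is None and ri is None:
--         return []
--     if ri is None or (li is not None and li < ri):
--         return str_list[:li]
--     return str_list[ri + 1:]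
-- ===== Notes on version B (the rewrite author's own statement) =====
-- stated objective: alternative
-- what changed: B finds the first positions of 'l' and 'r' independently with list.index and then decides by comparing the two positions, instead of A's single enumerate loop that acts on the first hit and breaks.
import Mathlib
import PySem

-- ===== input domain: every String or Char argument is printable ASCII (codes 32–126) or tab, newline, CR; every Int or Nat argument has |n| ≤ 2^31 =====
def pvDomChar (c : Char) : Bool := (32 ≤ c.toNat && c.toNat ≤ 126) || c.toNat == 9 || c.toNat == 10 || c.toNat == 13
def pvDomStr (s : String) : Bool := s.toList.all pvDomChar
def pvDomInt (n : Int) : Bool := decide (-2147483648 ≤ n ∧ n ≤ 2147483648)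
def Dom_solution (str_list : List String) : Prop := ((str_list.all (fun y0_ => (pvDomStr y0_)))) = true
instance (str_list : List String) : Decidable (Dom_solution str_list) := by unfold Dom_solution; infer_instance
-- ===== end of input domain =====

-- B locates the first 'l' and first 'r' independently and decides by comparing the
-- two positions, instead of A's single enumerate loop acting on the first hit (alternative decomposition).

-- ===== PORT A =====
-- the enumerate loop with break: idx is the running index, rest the unseen suffix
def solutionGo (str_list : List String) (idx : Nat) : List String → List String
  | [] => []
  | i :: t =>
    if i == "l" then PySem.List.slice str_list none (some (idx : Int))
    else if i == "r" then PySem.List.slice str_list (some ((idx : Int) + 1)) none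
    else solutionGo str_list (idx + 1) t

def solution (str_list : List String) : List String :=
  solutionGo str_list 0 str_list

-- ===== PORT B =====
def solution_alt (str_list : List String) : List String :=
  match PySem.List.index? str_list "l", PySem.List.index? str_list "r" with
  | none, none => []
  | some li, none => PySem.List.slice str_list none (some (li : Int))
  | none, some ri => PySem.List.slice str_list (some ((ri : Int) + 1)) none
  | some li, some ri =>
    if li < ri then PySem.List.slice str_list none (some (li : Int))
    else PySem.List.slice str_list (some ((ri : Int) + 1)) none

-- ===== PRECONDITION & SPEC =====
def Spec_solution (str_list : List String) (out : List String) : Prop := out = solution_alt str_list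
instance (str_list : List String) (out : List String) : Decidable (Spec_solution str_list out) := by unfold Spec_solution; infer_instance

-- ===== CLAIM (what is proved, stated in full; the proofs are below) =====
def Claim_equal_solution : Prop := ∀ (str_list : List String), Dom_solution str_list → Spec_solution str_list (solution str_list)

-- ===== LEMMAS AND PROOFS =====

theorem slice_to_nat (xs : List String) (n : Nat) :
    PySem.List.slice xs none (some (n : Int)) = xs.take n :=
  PySem.List.slice_to_natCast xs n

theorem slice_from_nat (xs : List String) (n : Nat) :
    PySem.List.slice xs (some ((n : Int) + 1)) none = xs.drop (n + 1) := by
  have : ((n : Int) + 1) = ((n + 1 : Nat) : Int) := by push_cast; ring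
  rw [this, PySem.List.slice_from_natCast]

theorem go_eq (rest : List String) : ∀ (full : List String) (idx : Nat),
    solutionGo full idx rest =
      match PySem.List.index? rest "l", PySem.List.index? rest "r" with
      | none, none => []
      | some li, none => full.take (idx + li)
      | none, some ri => full.drop (idx + ri + 1)
      | some li, some ri =>
        if li < ri then full.take (idx + li) else full.drop (idx + ri + 1) := by
  induction rest with
  | nil => intro full idx; simp [solutionGo, PySem.List.index?]
  | cons i t ih =>
    intro full idx
    by_cases hl : i = "l"
    · subst hl
      have hr : ("l" : String) ≠ "r" := by decide
      rw [PySem.List.index?_cons_of_ne _ hr]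
      simp only [solutionGo, beq_self_eq_true, if_true, PySem.List.index?_cons_self,
        slice_to_nat]
      cases PySem.List.index? t "r" with
      | none => simp
      | some ri => simp
    · by_cases hr : i = "r"
      · subst hr
        have hl' : ("r" : String) ≠ "l" := by decide
        rw [PySem.List.index?_cons_of_ne _ hl']
        simp only [solutionGo, PySem.List.index?_cons_self, slice_from_nat]
        have : (("r" : String) == "l") = false := by decide
        rw [this]
        simp only [Bool.false_eq_true, if_false, beq_self_eq_true, if_true]
        cases PySem.List.index? t "l" with
        | none => simp
        | some li => simp
      · rw [PySem.List.index?_cons_of_ne _ hl, PySem.List.index?_cons_of_ne _ hr]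
        have hbl : (i == "l") = false := by simp [hl]
        have hbr : (i == "r") = false := by simp [hr]
        simp only [solutionGo, hbl, hbr, Bool.false_eq_true, if_false]
        rw [ih full (idx + 1)]
        cases PySem.List.index? t "l" with
        | none =>
          cases PySem.List.index? t "r" with
          | none => simp
          | some ri => simp only [Option.map_some]; congr 1; omega
        | some li =>
          cases PySem.List.index? t "r" with
          | none => simp only [Option.map_some]; congr 1; omega
          | some ri =>
            simp only [Option.map_some]
            rcases Nat.lt_or_ge li ri with h | h
            · rw [if_pos h, if_pos (by omega : li + 1 < ri + 1)]; congr 1; omega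
            · rw [if_neg (by omega), if_neg (by omega : ¬ li + 1 < ri + 1)]; congr 1; omega

-- ===== VERDICT (by name: the statement is the Claim_ definition above) =====
theorem solution_spec : Claim_equal_solution := by
  intro str_list _
  unfold Spec_solution solution solution_alt
  rw [go_eq]
  cases hL : PySem.List.index? str_list "l" with
  | none =>
    cases hR : PySem.List.index? str_list "r" with
    | none => rfl
    | some ri => simp [slice_from_nat]
  | some li =>
    cases hR : PySem.List.index? str_list "r" with
    | none => simp
    | some ri => split <;> simp [slice_from_nat]
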